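-- pv_equiv track=rewrite | github.com/ryanpdwyer/pchem | apps/base.py | get_e_config
-- ===== SOURCE A (Python) =====
-- from collections import defaultdict
--
-- def max_electrons(subshell):
--     max_e = dict(s=2, p=6, d=10, f=14)
--     return max_e[subshell[1]]
--
-- shells_filling = ['1s', '2s', '2p', '3s', '3p', '4s', '3d', '4p', '5s', '4d', '5p', '6s']
--
-- def subshell_sort_func(subshell):
--     ell = {'s': 0, 'p': 1, 'd': 2, 'f': 3}
--     return int(subshell[0])*10 + ell[subshell[1]]
--
-- def get_e_config(protons, charge):
--     if charge > 0:
--         electrons_left = protons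
--     else:
--         electrons_left = protons - charge
--     i_shell = 0
--     ec = defaultdict(lambda : 0)
--     while electrons_left > 0:
--         subshell = shells_filling[i_shell]
--         if ec[subshell] < max_electrons(subshell):
--             ec[subshell] += 1
--             electrons_left -= 1
--         else:
--             i_shell += 1
--
--     if charge > 0: # We need to remove electrons from orbitals with highest n first
--         dkeys = list(ec.keys())
--         dkeys.sort(key=subshell_sort_func, reverse=True)
--         charge_left = charge
--         i = 0
--         while charge_left > 0:
--             if ec[dkeys[i]] > 0:
--                 ec[dkeys[i]] -= 1
--                 charge_left -= 1
--             else: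
--                 i += 1
--
--     return ec
-- ===== SOURCE B (Python) =====
-- shells_filling = ['1s', '2s', '2p', '3s', '3p', '4s', '3d', '4p', '5s', '4d', '5p', '6s']
--
-- def max_electrons(subshell):
--     max_e = dict(s=2, p=6, d=10, f=14)
--     return max_e[subshell[1]]
--
-- def subshell_sort_func(subshell):
--     ell = {'s': 0, 'p': 1, 'd': 2, 'f': 3}
--     return int(subshell[0])*10 + ell[subshell[1]]
--
-- def get_e_config(protons, charge):
--     electrons_left = protons if charge > 0 else protons - charge
--     ec = {}
--     i = 0
--     while electrons_left > 0:
--         sub = shells_filling[i]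
--         take = min(max_electrons(sub), electrons_left)
--         ec[sub] = take
--         electrons_left -= take
--         i += 1
--     if charge > 0:
--         charge_left = charge
--         for sub in sorted(ec, key=subshell_sort_func, reverse=True):
--             if charge_left <= 0:
--                 break
--             take = min(ec[sub], charge_left)
--             ec[sub] -= take
--             charge_left -= take
--     return ec
-- ===== Notes on version B (the rewrite author's own statement) =====
-- stated objective: simpler
-- what changed: B fills (and, for cations, empties) each subshell in one bulk min-chunk step with a plain dict and a for-loop over the sorted keys, instead of A's per-electron while-loops over a defaultdict with manual index bookkeeping.
import Mathlib
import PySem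

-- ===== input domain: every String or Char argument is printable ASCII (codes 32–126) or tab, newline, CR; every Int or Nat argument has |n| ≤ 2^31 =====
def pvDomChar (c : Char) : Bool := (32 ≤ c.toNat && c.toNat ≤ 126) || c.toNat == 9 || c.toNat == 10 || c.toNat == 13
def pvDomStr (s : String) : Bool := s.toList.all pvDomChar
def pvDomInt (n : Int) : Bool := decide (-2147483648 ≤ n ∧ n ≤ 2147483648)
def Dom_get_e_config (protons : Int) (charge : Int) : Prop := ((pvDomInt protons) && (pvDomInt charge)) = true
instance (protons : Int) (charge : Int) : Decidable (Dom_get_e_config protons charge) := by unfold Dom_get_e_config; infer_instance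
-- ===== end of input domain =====

-- B replaces A's per-electron while-loop (and per-electron cation removal) with one bulk
-- min-chunk step per subshell: simpler, and one loop iteration per subshell instead of per electron.

-- ===== PORT A =====
def shells_filling : List String := ["1s", "2s", "2p", "3s", "3p", "4s", "3d", "4p", "5s", "4d", "5p", "6s"]

-- max_e[subshell[1]]; the KeyError/IndexError paths are unreachable on the shells A passes in (returns 0 there)
def max_electrons (subshell : String) : Int :=
  match PySem.Str.pyGet? subshell 1 with
  | some c => (PySem.Dict.ofList [("s", (2:Int)), ("p", 6), ("d", 10), ("f", 14)]).getD (String.ofList [c]) 0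
  | none => 0

-- int(subshell[0])*10 + ell[subshell[1]]; unreachable error paths return 0
def subshell_sort_func (subshell : String) : Int :=
  (match PySem.Str.pyGet? subshell 0 with
   | some c => (PySem.Int.ofStr? (String.ofList [c])).getD 0
   | none => 0) * 10 +
  (match PySem.Str.pyGet? subshell 1 with
   | some c => (PySem.Dict.ofList [("s", (0:Int)), ("p", 1), ("d", 2), ("f", 3)]).getD (String.ofList [c]) 0
   | none => 0)

-- A's fill while-loop; each step decrements electrons_left or advances i_shell, fuel covers both.
-- ec[subshell] on a defaultdict inserts the key with 0 when absent, so that read is modelled first.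
def fillA : Nat → Int → Int → PySem.Dict String Int → PySem.Dict String Int
  | 0, _, _, ec => ec
  | fuel + 1, el, i, ec =>
    if el > 0 then
      match PySem.List.pyGet? shells_filling i with
      | none => ec  -- IndexError (outside Pre_)
      | some sub =>
        let ec := if (ec.get? sub).isSome then ec else ec.insert sub 0  -- defaultdict read of ec[subshell]
        if ec.getD sub 0 < max_electrons sub then
          fillA fuel (el - 1) i (ec.insert sub (ec.getD sub 0 + 1))
        else
          fillA fuel el (i + 1) ec
    else ec

-- A's cation-removal while-loop
def removeA : Nat → Int → Int → List String → PySem.Dict String Int → PySem.Dict String Int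
  | 0, _, _, _, ec => ec
  | fuel + 1, cl, i, dkeys, ec =>
    if cl > 0 then
      match PySem.List.pyGet? dkeys i with
      | none => ec  -- IndexError (outside Pre_)
      | some k =>
        if ec.getD k 0 > 0 then
          removeA fuel (cl - 1) i dkeys (ec.insert k (ec.getD k 0 - 1))
        else
          removeA fuel cl (i + 1) dkeys ec
    else ec

def coreA (electrons_left : Int) (charge : Int) : List (String × Int) :=
  let ec := fillA (electrons_left.toNat + 13) electrons_left 0 PySem.Dict.empty
  if charge > 0 then
    let dkeys := PySem.List.sorted (PySem.Dict.keys ec) (key := subshell_sort_func) (reverse := true)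
    (removeA (charge.toNat + dkeys.length + 1) charge 0 dkeys ec).items
  else ec.items

def get_e_config (protons : Int) (charge : Int) : List (String × Int) :=
  coreA (if charge > 0 then protons else protons - charge) charge

-- ===== PORT B =====
-- B walks the subshell list itself, filling each subshell with min(capacity, electrons_left) in one step
def fillB : List String → Int → PySem.Dict String Int → PySem.Dict String Int
  | [], _, ec => ec  -- IndexError (outside Pre_)
  | sub :: rest, el, ec =>
    if el > 0 then
      let take := min (max_electrons sub) el
      fillB rest (el - take) (ec.insert sub take)
    else ec

-- B's for-loop over the sorted keys, removing min(ec[sub], charge_left) per key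
def removeB : List String → Int → PySem.Dict String Int → PySem.Dict String Int
  | [], _, ec => ec
  | sub :: rest, cl, ec =>
    if cl ≤ 0 then ec
    else
      let take := min (ec.getD sub 0) cl
      removeB rest (cl - take) (ec.insert sub (ec.getD sub 0 - take))

def coreB (electrons_left : Int) (charge : Int) : List (String × Int) :=
  let ec := fillB shells_filling electrons_left PySem.Dict.empty
  if charge > 0 then
    (removeB (PySem.List.sorted (PySem.Dict.keys ec) (key := subshell_sort_func) (reverse := true)) charge ec).items
  else ec.items

def get_e_config_alt (protons : Int) (charge : Int) : List (String × Int) :=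
  coreB (if charge > 0 then protons else protons - charge) charge

-- ===== PRECONDITION & SPEC =====
-- Pre_ excludes exactly the inputs where A raises IndexError: more electrons than the 12 listed
-- subshells hold (capacity 56), or a positive charge exceeding the electron count (the removal
-- loop runs off the end of the key list).
def Pre_get_e_config (protons : Int) (charge : Int) : Prop :=
  (charge > 0 → charge ≤ protons ∧ protons ≤ 56) ∧ (charge ≤ 0 → protons - charge ≤ 56)
instance (protons : Int) (charge : Int) : Decidable (Pre_get_e_config protons charge) := by
  unfold Pre_get_e_config; infer_instance

def pvWitness_get_e_config : Int × Int := (26, 2)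

def Spec_get_e_config (protons : Int) (charge : Int) (out : List (String × Int)) : Prop := out = get_e_config_alt protons charge
instance (protons : Int) (charge : Int) (out : List (String × Int)) : Decidable (Spec_get_e_config protons charge out) := by unfold Spec_get_e_config; infer_instance

-- ===== CLAIM (what is proved, stated in full; the proofs are below) =====
def Claim_equal_get_e_config : Prop := ∀ (protons : Int) (charge : Int), Dom_get_e_config protons charge → Pre_get_e_config protons charge → Spec_get_e_config protons charge (get_e_config protons charge)


-- ===== LEMMAS AND PROOFS =====

-- both fill loops return the accumulator unchanged when no electrons are left to place
theorem fillA_stop (fuel : Nat) (e i : Int) (ec : PySem.Dict String Int) (he : e ≤ 0) :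
    fillA fuel e i ec = ec := by
  cases fuel with
  | zero => rfl
  | succ n => simp only [fillA]; rw [if_neg (by omega)]

theorem fillB_stop (l : List String) (e : Int) (ec : PySem.Dict String Int) (he : e ≤ 0) :
    fillB l e ec = ec := by
  cases l with
  | nil => rfl
  | cons a t => simp only [fillB]; rw [if_neg (by omega)]

-- for 1..56 electrons the per-electron fill and the bulk fill build the same dict (finite check)
set_option maxRecDepth 100000 in
set_option maxHeartbeats 1000000 in
theorem fill_eq_bulk : ∀ e ∈ Finset.Icc (1:Int) 56,
    fillA (e.toNat + 13) e 0 PySem.Dict.empty = fillB shells_filling e PySem.Dict.empty := by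
  decide

-- for 1 ≤ c ≤ e ≤ 56 the whole cation pipeline agrees (finite check)
set_option maxRecDepth 100000 in
set_option maxHeartbeats 4000000 in
theorem core_eq_cation : ∀ e ∈ Finset.Icc (1:Int) 56, ∀ c ∈ Finset.Icc (1:Int) e,
    coreA e c = coreB e c := by
  decide

theorem coreA_eq_coreB_nonpos (e c : Int) (he : e ≤ 0) (hc : c ≤ 0) : coreA e c = coreB e c := by
  unfold coreA coreB
  rw [fillA_stop _ _ _ _ he, fillB_stop _ _ _ he, if_neg (by omega : ¬ c > 0), if_neg (by omega : ¬ c > 0)]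

theorem coreA_eq_coreB_pos (e c : Int) (he1 : 1 ≤ e) (he2 : e ≤ 56) (hc : c ≤ 0) :
    coreA e c = coreB e c := by
  unfold coreA coreB
  rw [if_neg (by omega : ¬ c > 0), if_neg (by omega : ¬ c > 0),
      fill_eq_bulk e (Finset.mem_Icc.mpr ⟨he1, he2⟩)]

theorem coreA_eq_coreB_cation (e c : Int) (hc1 : 1 ≤ c) (hce : c ≤ e) (he : e ≤ 56) :
    coreA e c = coreB e c :=
  core_eq_cation e (Finset.mem_Icc.mpr ⟨by omega, he⟩) c (Finset.mem_Icc.mpr ⟨hc1, hce⟩)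

-- ===== VERDICT (by name: the statement is the Claim_ definition above) =====
theorem get_e_config_spec : Claim_equal_get_e_config := by
  intro p c _ hpre
  unfold Spec_get_e_config get_e_config get_e_config_alt
  obtain ⟨h1, h2⟩ := hpre
  by_cases hc : c > 0
  · obtain ⟨hcp, hp⟩ := h1 hc
    simp only [if_pos hc]
    exact coreA_eq_coreB_cation p c hc hcp hp
  · have hc' : c ≤ 0 := by omega
    have h2' := h2 hc'
    simp only [if_neg (by omega : ¬ c > 0)]
    by_cases he : p - c ≤ 0
    · exact coreA_eq_coreB_nonpos _ _ he hc'
    · exact coreA_eq_coreB_pos _ _ (by omega) (by omega) hc'
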